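-- pv_equiv track=rewrite | github.com/worldwidelaw/legal-sources | sources/US/DC-Code/bootstrap.py | _path_to_metadata
-- ===== SOURCE A (Python) =====
-- from typing import Generator, Optional, Dict, Any, List
--
-- def _path_to_metadata(file_path: str) -> Dict[str, str]:
--     """Extract title number and section number from file path."""
--     # Path: us/dc/council/code/titles/1/sections/1-1001.01.xml
--     parts = file_path.split("/")
--     title_num = None
--     section_file = None
--
--     for i, part in enumerate(parts):
--         if part == "titles" and i + 1 < len(parts):
--             title_num = parts[i + 1]
--         if part == "sections" and i + 1 < len(parts):
--             section_file = parts[i + 1]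
--
--     section_num = section_file.replace(".xml", "") if section_file else None
--
--     return {
--         "title_number": title_num,
--         "section_number": section_num,
--     }
-- ===== SOURCE B (Python) =====
-- def _path_to_metadata(file_path):
--     """Extract title number and section number from file path."""
--     parts = file_path.split("/")
--     pairs = list(zip(parts, parts[1:]))
--
--     def after_last(key):
--         # first match scanning from the END = last occurrence; stops early
--         for a, b in reversed(pairs):
--             if a == key:
--                 return b
--         return None
--
--     section_file = after_last("sections")
--     return {
--         "title_number": after_last("titles"),
--         "section_number": section_file.replace(".xml", "") if section_file else None,
--     }
-- ===== Notes on version B (the rewrite author's own statement) =====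
-- stated objective: alternative
-- what changed: Replaces A's forward overwrite scan (two index-guarded branches, last write wins) by a backward scan over the zipped adjacent pairs that returns at the FIRST match from the end, so no overwrite state is kept and the scan stops early.
import Mathlib
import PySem

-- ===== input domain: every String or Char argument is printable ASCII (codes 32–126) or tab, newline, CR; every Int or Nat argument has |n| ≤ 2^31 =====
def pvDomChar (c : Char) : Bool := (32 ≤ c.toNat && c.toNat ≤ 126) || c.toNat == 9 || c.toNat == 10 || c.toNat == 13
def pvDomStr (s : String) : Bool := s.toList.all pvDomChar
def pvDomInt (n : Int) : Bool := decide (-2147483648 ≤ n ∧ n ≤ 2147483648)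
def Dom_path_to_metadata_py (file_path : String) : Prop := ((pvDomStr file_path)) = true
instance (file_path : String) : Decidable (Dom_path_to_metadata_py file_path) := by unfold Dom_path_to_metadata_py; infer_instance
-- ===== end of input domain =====

-- B replaces A's forward overwrite scan by a backward early-exit scan over the zipped adjacent pairs (first match from the end = last occurrence); alternative decomposition, same cost.


-- ===== PORT A =====
-- A-side helper: the body of A's for-loop (both branches, same order).
def pvStepA (parts : List String) (st : Option String × Option String) (p : Int × String) :
    Option String × Option String :=
  (if p.2 = "titles" ∧ p.1 + 1 < (parts.length : Int) then PySem.List.pyGet? parts (p.1 + 1) else st.1,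
   if p.2 = "sections" ∧ p.1 + 1 < (parts.length : Int) then PySem.List.pyGet? parts (p.1 + 1) else st.2)

def path_to_metadata_py (file_path : String) : List (String × Option String) :=
  let parts := (PySem.Str.split? file_path "/").getD []
  let st := (PySem.List.enumerate parts 0).foldl (pvStepA parts) (none, none)
  let section_num : Option String :=
    match st.2 with
    | none => none
    | some sf => if sf = "" then none else some (PySem.Str.replace sf ".xml" "")
  [("title_number", st.1), ("section_number", section_num)]

-- ===== PORT B =====
-- B-side helper: the `for a, b in reversed(pairs): if a == key: return b` loop (early exit on first match).
def pvAfterLast (key : String) : List (String × String) → Option String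
  | [] => none
  | p :: t => if p.1 = key then some p.2 else pvAfterLast key t

def path_to_metadata_py_alt (file_path : String) : List (String × Option String) :=
  let parts := (PySem.Str.split? file_path "/").getD []
  -- pairs = list(zip(parts, parts[1:])); parts[1:] is slice from 1
  let pairs := parts.zip (PySem.List.slice parts (some 1) none)
  let section_file := pvAfterLast "sections" pairs.reverse
  let section_num : Option String :=
    match section_file with
    | none => none
    | some sf => if sf = "" then none else some (PySem.Str.replace sf ".xml" "")
  [("title_number", pvAfterLast "titles" pairs.reverse), ("section_number", section_num)]

-- ===== PRECONDITION & SPEC =====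
def Spec_path_to_metadata_py (file_path : String) (out : List (String × Option String)) : Prop := out = path_to_metadata_py_alt file_path
instance (file_path : String) (out : List (String × Option String)) : Decidable (Spec_path_to_metadata_py file_path out) := by unfold Spec_path_to_metadata_py; infer_instance

-- ===== CLAIM (what is proved, stated in full; the proofs are below) =====
def Claim_equal_path_to_metadata_py : Prop := ∀ (file_path : String), Dom_path_to_metadata_py file_path → Spec_path_to_metadata_py file_path (path_to_metadata_py file_path)

-- ===== LEMMAS AND PROOFS =====

-- the last-occurrence update step over adjacent pairs: the reference shape of A's fold
def pvUpd (K : String) (st : Option String) (p : String × String) : Option String :=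
  if p.1 = K then some p.2 else st

-- A's enumerate fold equals componentwise last-occurrence folds over the adjacent pairs.
theorem pvA_gen : ∀ (suf pre : List String) (acc : Option String × Option String),
    (PySem.List.enumerate suf (pre.length : Int)).foldl (pvStepA (pre ++ suf)) acc
    = ((suf.zip suf.tail).foldl (pvUpd "titles") acc.1,
       (suf.zip suf.tail).foldl (pvUpd "sections") acc.2) := by
  intro suf
  induction suf with
  | nil => intro pre acc; simp [PySem.List.enumerate_nil]
  | cons y rest ih =>
    intro pre acc
    rw [PySem.List.enumerate_cons]
    simp only [List.foldl_cons]
    have hshift : ((pre.length : Int) + 1) = (((pre ++ [y]).length : Nat) : Int) := by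
      simp only [List.length_append, List.length_cons, List.length_nil]; push_cast; omega
    have happ : pre ++ y :: rest = (pre ++ [y]) ++ rest := by simp
    rw [hshift, happ, ih (pre ++ [y])]
    cases rest with
    | nil =>
      simp [pvStepA]
    | cons z rest' =>
      have hget : PySem.List.pyGet? ((pre ++ [y]) ++ z :: rest') ((pre.length : Int) + 1)
          = some z := by
        rw [hshift, PySem.List.pyGet?_natCast]
        simp
      simp only [pvStepA, pvUpd, List.zip_cons_cons, List.tail_cons, List.foldl_cons]
      rw [hget]
      simp

-- pvAfterLast distributes over append: first match in the left part wins
theorem pvAfterLast_append (K : String) : ∀ (l m : List (String × String)),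
    pvAfterLast K (l ++ m)
      = match pvAfterLast K l with | some v => some v | none => pvAfterLast K m := by
  intro l m
  induction l with
  | nil => rfl
  | cons p t ih =>
    simp only [List.cons_append, pvAfterLast]
    by_cases h : p.1 = K
    · simp [h]
    · simp [h, ih]

-- the forward overwrite fold equals the first match of the reversed list (falling back to the accumulator)
theorem pvFold_eq_afterLast (K : String) : ∀ (l : List (String × String)) (acc : Option String),
    l.foldl (pvUpd K) acc
      = match pvAfterLast K l.reverse with | some v => some v | none => acc := by
  intro l
  induction l with
  | nil => intro acc; rfl
  | cons p t ih =>
    intro acc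
    simp only [List.foldl_cons, List.reverse_cons, ih, pvAfterLast_append]
    cases pvAfterLast K t.reverse with
    | some v => rfl
    | none =>
      simp only [pvAfterLast, pvUpd]
      by_cases h : p.1 = K <;> simp [h]

-- ===== VERDICT (by name: the statement is the Claim_ definition above) =====
theorem path_to_metadata_py_spec : Claim_equal_path_to_metadata_py := by
  intro file_path _
  unfold Spec_path_to_metadata_py path_to_metadata_py path_to_metadata_py_alt
  have hA := pvA_gen ((PySem.Str.split? file_path "/").getD []) [] (none, none)
  simp only [List.nil_append, List.length_nil, Nat.cast_zero] at hA
  have hid : ∀ (o : Option String), (match o with | some v => some v | none => (none : Option String)) = o := by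
    intro o; cases o <;> rfl
  simp only [hA, PySem.List.slice_from_one, pvFold_eq_afterLast, hid]
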